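-- pv_equiv track=rewrite | github.com/alan-jiang-angel/CliqueAI | CliqueAI/clique_algorithms/greedy_exp_rand_algorithm.py | load_adjlist
-- ===== SOURCE A (Python) =====
-- def load_adjlist(data):
--     if isinstance(data, dict):
--         n = max(int(k) for k in data.keys()) + 1
--         tmp = [set() for _ in range(n)]
--         for k, vs in data.items():
--             u = int(k)
--             for v in vs:
--                 if v != u:
--                     tmp[u].add(int(v))
--     else:
--         n = len(data)
--         tmp = [set(v for v in vs if v != i) for i, vs in enumerate(data)]
--
--     for u in range(n):
--         for v in list(tmp[u]):
--             tmp[v].add(u)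
--
--     adj = [0] * n
--     for u in range(n):
--         mask = 0
--         for v in tmp[u]:
--             mask |= 1 << v
--         adj[u] = mask
--
--     return adj
-- ===== SOURCE B (Python) =====
-- def load_adjlist(data):
--     # One fused pass: maintain integer bitmasks directly, setting both
--     # directions of each edge, instead of building a list of sets and
--     # symmetrizing/mask-building in separate passes.
--     if isinstance(data, dict):
--         n = max(int(k) for k in data.keys()) + 1
--         adj = [0] * n
--         for k, vs in data.items():
--             u = int(k)
--             for v in vs:
--                 if v != u:
--                     w = int(v)
--                     adj[u] |= 1 << w
--                     adj[w] |= 1 << u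
--         return adj
--     n = len(data)
--     adj = [0] * n
--     for u, vs in enumerate(data):
--         for v in vs:
--             if v != u:
--                 adj[u] |= 1 << v
--                 adj[v] |= 1 << u
--     return adj
-- ===== Notes on version B (the rewrite author's own statement) =====
-- stated objective: simpler
-- what changed: B maintains integer bitmasks directly and sets both directions of each edge in a single fused pass over the input rows, eliminating A's intermediate list-of-sets, its separate symmetrization loop and its separate mask-building loop.
import Mathlib
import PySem

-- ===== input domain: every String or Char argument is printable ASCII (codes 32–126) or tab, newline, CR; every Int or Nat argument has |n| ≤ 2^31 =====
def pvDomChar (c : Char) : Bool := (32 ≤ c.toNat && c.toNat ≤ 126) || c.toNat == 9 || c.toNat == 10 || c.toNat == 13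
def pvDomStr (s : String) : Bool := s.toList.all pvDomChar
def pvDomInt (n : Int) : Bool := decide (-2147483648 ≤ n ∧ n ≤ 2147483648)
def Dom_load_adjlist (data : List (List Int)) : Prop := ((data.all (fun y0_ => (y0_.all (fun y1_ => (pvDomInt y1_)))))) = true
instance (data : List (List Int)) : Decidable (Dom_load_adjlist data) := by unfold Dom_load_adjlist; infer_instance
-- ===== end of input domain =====

-- B fuses A's three passes (build list-of-sets, symmetrize, build masks) into one pass
-- that maintains integer bitmasks directly; objective: simpler.

-- ===== PORT A =====
-- helper: the body of A's symmetrization loop 'for v in list(tmp[u]): tmp[v].add(u)'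
-- (the snapshot list(tmp[u]) is the third argument, taken before the inner loop runs)
def symInner (u : Int) (t : List (List Int)) (l : List Int) : List (List Int) :=
  l.foldl (fun t v => PySem.List.pySetD t v (PySem.Set.add (PySem.List.pyGetD t v []) u)) t

-- helper: 'mask = 0; for v in tmp[u]: mask |= 1 << v' — iteration order over the set does
-- not affect the result; '1 << v' is ported as '1 <<< v.toNat', exact for 0 ≤ v (Python
-- raises ValueError on a negative shift; Pre_ excludes those inputs)
def maskOf (l : List Int) : Int :=
  l.foldl (fun mask v => PySem.Int.bor mask ((1:Int) <<< (v.toNat:Int))) 0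

-- A, list branch (the signature admits only list input): tmp = [set(v for v in vs if v != i)],
-- then symmetrize, then build adj. tmp[v] uses pySetD/pyGetD, exact under Pre_ (0 ≤ v < n;
-- Python raises IndexError/ValueError on the excluded neighbours).
def load_adjlist (data : List (List Int)) : List Int :=
  let n := data.length
  let tmp : List (List Int) :=
    (PySem.List.enumerate data).map (fun p => PySem.Set.ofList (p.2.filter (fun v => v ≠ p.1)))
  let tmp2 := (PySem.List.pyRange 0 (n : Int) 1).foldl
      (fun t u => symInner u t (PySem.List.pyGetD t u [])) tmp
  (PySem.List.pyRange 0 (n : Int) 1).foldl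
      (fun a u => PySem.List.pySetD a u (maskOf (PySem.List.pyGetD tmp2 u [])))
      (List.replicate n (0 : Int))

-- ===== PORT B =====
-- B: adj = [0]*n; one pass over enumerate(data): for each v != u set both bits.
def load_adjlist_alt (data : List (List Int)) : List Int :=
  (PySem.List.enumerate data).foldl
    (fun adj p =>
      p.2.foldl
        (fun adj v =>
          if v ≠ p.1 then
            let adj1 := PySem.List.pySetD adj p.1
              (PySem.Int.bor (PySem.List.pyGetD adj p.1 0) ((1:Int) <<< (v.toNat:Int)))
            PySem.List.pySetD adj1 v
              (PySem.Int.bor (PySem.List.pyGetD adj1 v 0) ((1:Int) <<< (p.1.toNat:Int)))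
          else adj)
        adj)
    (List.replicate data.length (0 : Int))

-- ===== PRECONDITION & SPEC =====
-- Pre_: every neighbour index lies in [0, n). Exactly where A returns: a neighbour v ≥ n or
-- v < -n raises IndexError at tmp[v], and -n ≤ v < 0 raises ValueError at '1 << v'.
def Pre_load_adjlist (data : List (List Int)) : Prop :=
  ∀ row ∈ data, ∀ v ∈ row, 0 ≤ v ∧ v < (data.length : Int)
instance (data : List (List Int)) : Decidable (Pre_load_adjlist data) := by
  unfold Pre_load_adjlist; infer_instance

def pvWitness_load_adjlist : List (List Int) := [[1], [0, 1]]

def Spec_load_adjlist (data : List (List Int)) (out : List Int) : Prop := out = load_adjlist_alt data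
instance (data : List (List Int)) (out : List Int) : Decidable (Spec_load_adjlist data out) := by
  unfold Spec_load_adjlist; infer_instance

-- ===== CLAIM (what is proved, stated in full; the proofs are below) =====
def Claim_equal_load_adjlist : Prop := ∀ (data : List (List Int)), Dom_load_adjlist data → Pre_load_adjlist data → Spec_load_adjlist data (load_adjlist data)

-- ===== LEMMAS AND PROOFS =====

-- bit w of the j-th mask of a state
def bitOf (adj : List Int) (j w : Nat) : Bool := ((adj.getD j 0).toNat).testBit w

lemma one_shl_cast (k : Nat) : ((1:Int) <<< (k:Int)) = ((1 <<< k : Nat) : Int) := by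
  rw [Int.shiftLeft_natCast_right]
  simp [HShiftLeft.hShiftLeft, Int.shiftLeft]

lemma testBit_one_shl (k w : Nat) : (1 <<< k).testBit w = decide (k = w) := by
  rw [Nat.one_shiftLeft]; exact Nat.testBit_two_pow

-- one '|=' update, seen on bits
lemma bit_upd (adj : List Int) (hnn : ∀ x ∈ adj, 0 ≤ x) (u k j w : Nat) :
    bitOf (adj.set u (PySem.Int.bor (adj.getD u 0) ((1:Int) <<< (k:Int)))) j w
      = (bitOf adj j w || decide (j = u ∧ w = k ∧ u < adj.length)) := by
  by_cases hu : u < adj.length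
  · have h0 : 0 ≤ adj.getD u 0 := by
      rw [List.getD_eq_getElem _ _ hu]; exact hnn _ (List.getElem_mem _)
    have hbor : PySem.Int.bor (adj.getD u 0) ((1:Int) <<< (k:Int))
        = (((adj.getD u 0).toNat ||| (1 <<< k : Nat) : Nat) : Int) := by
      rw [one_shl_cast, PySem.Int.bor_of_nonneg h0 (by positivity)]
      rw [Int.toNat_natCast]
    by_cases hj : j = u
    · subst hj
      unfold bitOf
      rw [List.getD_eq_getElem _ _ (by simpa using hu), List.getElem_set_self (by simpa using hu)]
      rw [hbor, List.getD_eq_getElem _ _ hu]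
      rw [Int.toNat_natCast, Nat.testBit_or, testBit_one_shl]
      by_cases hw : k = w <;> simp [hw, hu] <;> omega
    · unfold bitOf
      rw [show (adj.set u _).getD j 0 = adj.getD j 0 by
        simp [List.getD, List.getElem?_set_ne (Ne.symm hj)]]
      simp [hj]
  · rw [List.set_eq_of_length_le (by omega)]
    simp [hu]

lemma nonneg_upd (adj : List Int) (hnn : ∀ x ∈ adj, 0 ≤ x) (u k : Nat) :
    ∀ x ∈ adj.set u (PySem.Int.bor (adj.getD u 0) ((1:Int) <<< (k:Int))), 0 ≤ x := by
  by_cases hu : u < adj.length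
  · intro x hx
    rcases List.mem_or_eq_of_mem_set hx with h | h
    · exact hnn _ h
    · subst h
      have h0 : 0 ≤ adj.getD u 0 := by
        rw [List.getD_eq_getElem _ _ hu]; exact hnn _ (List.getElem_mem _)
      rw [one_shl_cast, PySem.Int.bor_of_nonneg h0 (by positivity)]
      positivity
  · rw [List.set_eq_of_length_le (by omega)]; exact hnn

-- ---- A side ----

-- membership after one 'tmp[m].add(u)'
lemma mem_set_add (t : List (List Int)) (m : Nat) (u x : Int) (i : Nat) :
    (x ∈ (t.set m (PySem.Set.add (t.getD m []) u)).getD i []) ↔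
      (x ∈ t.getD i [] ∨ (x = u ∧ i = m ∧ m < t.length)) := by
  by_cases hm : m < t.length
  · by_cases hi : i = m
    · subst hi
      rw [List.getD_eq_getElem _ _ (by simpa using hm), List.getElem_set_self (by simpa using hm)]
      rw [PySem.Set.mem_add, List.getD_eq_getElem _ _ hm]
      constructor
      · rintro (h | h)
        · exact Or.inl h
        · exact Or.inr ⟨h, rfl, hm⟩
      · rintro (h | ⟨h, _, _⟩)
        · exact Or.inl h
        · subst h; exact Or.inr rfl
    · rw [show (t.set m _).getD i [] = t.getD i [] by
        simp [List.getD, List.getElem?_set_ne (Ne.symm hi)]]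
      simp [hi]
  · rw [List.set_eq_of_length_le (by omega)]
    simp [hm]

lemma symInner_len (u : Int) (l : List Int) (t : List (List Int)) :
    (symInner u t l).length = t.length := by
  induction l generalizing t with
  | nil => rfl
  | cons v l ih =>
    unfold symInner at *
    rw [List.foldl_cons, ih, PySem.List.length_pySetD]

lemma symInner_mem (u : Int) (l : List Int) (t : List (List Int)) (hl : ∀ v ∈ l, 0 ≤ v)
    (i : Nat) (x : Int) :
    (x ∈ (symInner u t l).getD i [] ↔
      x ∈ t.getD i [] ∨ (x = u ∧ ∃ v ∈ l, v.toNat = i ∧ v.toNat < t.length)) := by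
  induction l generalizing t with
  | nil => simp [symInner]
  | cons v l ih =>
    have hv : (0:Int) ≤ v := hl v (by simp)
    have hstep : symInner u t (v :: l)
        = symInner u (t.set v.toNat (PySem.Set.add (t.getD v.toNat []) u)) l := by
      unfold symInner
      rw [List.foldl_cons, PySem.List.pyGetD_of_nonneg t [] hv, PySem.List.pySetD_of_nonneg t _ hv]
    rw [hstep, ih _ (fun w hw => hl w (by simp [hw]))]
    rw [mem_set_add]
    rw [List.length_set]
    constructor
    · rintro ((h | ⟨hx, hi, hm⟩) | ⟨hx, w, hw, hwi, hwl⟩)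
      · exact Or.inl h
      · exact Or.inr ⟨hx, v, by simp, by omega, by omega⟩
      · exact Or.inr ⟨hx, w, by simp [hw], hwi, hwl⟩
    · rintro (h | ⟨hx, w, hw, hwi, hwl⟩)
      · exact Or.inl (Or.inl h)
      · rcases List.mem_cons.mp hw with h | h
        · subst h; exact Or.inl (Or.inr ⟨hx, hwi.symm, hwl⟩)
        · exact Or.inr ⟨hx, w, h, hwi, hwl⟩

-- the initial tmp
lemma tmp0_mem (data : List (List Int)) (i : Nat) (x : Int) :
    (x ∈ ((PySem.List.enumerate data).map
        (fun p => PySem.Set.ofList (p.2.filter (fun v => v ≠ p.1)))).getD i [] ↔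
      (i < data.length ∧ x ∈ data.getD i [] ∧ x ≠ (i : Int))) := by
  by_cases hi : i < data.length
  · have hlen : i < ((PySem.List.enumerate data).map
        (fun p => PySem.Set.ofList (p.2.filter (fun v => v ≠ p.1)))).length := by
      simp [PySem.List.length_enumerate, hi]
    rw [List.getD_eq_getElem _ _ hlen, List.getElem_map, PySem.List.getElem_enumerate]
    rw [List.getD_eq_getElem _ _ hi]
    simp [PySem.Set.mem_ofList, List.mem_filter, hi]
  · have hlen : ¬ i < ((PySem.List.enumerate data).map
        (fun p => PySem.Set.ofList (p.2.filter (fun v => v ≠ p.1)))).length := by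
      simp [PySem.List.length_enumerate, hi]
    rw [List.getD_eq_default _ _ (by omega)]
    simp [hi]

-- proof-layer names for A's three phases
def tmpInit (data : List (List Int)) : List (List Int) :=
  (PySem.List.enumerate data).map (fun p => PySem.Set.ofList (p.2.filter (fun v => v ≠ p.1)))

def TK (data : List (List Int)) (k : Nat) : List (List Int) :=
  (PySem.List.pyRange 0 (k : Int) 1).foldl
    (fun t u => symInner u t (PySem.List.pyGetD t u [])) (tmpInit data)

def AK (tmp2 : List (List Int)) (n k : Nat) : List Int :=
  (PySem.List.pyRange 0 (k : Int) 1).foldl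
    (fun a u => PySem.List.pySetD a u (maskOf (PySem.List.pyGetD tmp2 u [])))
    (List.replicate n (0 : Int))

lemma load_adjlist_eq (data : List (List Int)) :
    load_adjlist data = AK (TK data data.length) data.length data.length := rfl

-- the symmetrization phase, processed up to u < k
lemma tmp0_range (data : List (List Int)) (hpre : Pre_load_adjlist data) (i : Nat) (x : Int)
    (hx : x ∈ (tmpInit data).getD i []) : 0 ≤ x ∧ x < (data.length : Int) := by
  obtain ⟨hi, hmem, -⟩ := (tmp0_mem data i x).mp hx
  have hrow : data.getD i [] ∈ data := by
    rw [List.getD_eq_getElem _ _ hi]; exact List.getElem_mem _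
  exact hpre _ hrow x hmem

lemma TK_succ (data : List (List Int)) (k : Nat) :
    TK data (k + 1) = symInner (k : Int) (TK data k)
      (PySem.List.pyGetD (TK data k) (k : Int) []) := by
  unfold TK
  rw [show ((k + 1 : Nat) : Int) = (k : Int) + 1 by push_cast; ring]
  rw [PySem.List.pyRange_one_succ_right (by positivity)]
  rw [List.foldl_append]
  rfl

lemma symPhase_spec (data : List (List Int)) (hpre : Pre_load_adjlist data) (k : Nat)
    (hk : k ≤ data.length) :
    (TK data k).length = data.length ∧
    (∀ i, ∀ x ∈ (TK data k).getD i [], 0 ≤ x ∧ x < (data.length : Int)) ∧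
    (∀ i x, x ∈ (TK data k).getD i [] ↔
       x ∈ (tmpInit data).getD i [] ∨
         (∃ j : Nat, j < k ∧ x = (j : Int) ∧ (i : Int) ∈ (tmpInit data).getD j [])) := by
  induction k with
  | zero =>
    refine ⟨by simp [TK, PySem.List.pyRange, tmpInit, PySem.List.length_enumerate], ?_, ?_⟩
    · intro i x hx
      exact tmp0_range data hpre i x (by simpa [TK, PySem.List.pyRange] using hx)
    · intro i x
      simp [TK, PySem.List.pyRange]
  | succ k ih =>
    obtain ⟨ihlen, ihrange, ihmem⟩ := ih (by omega)
    have hsnap : PySem.List.pyGetD (TK data k) (k : Int) [] = (TK data k).getD k [] := by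
      rw [PySem.List.pyGetD_of_nonneg _ _ (by positivity), Int.toNat_natCast]
    have hsnap_nn : ∀ v ∈ (TK data k).getD k [], 0 ≤ v := fun v hv => (ihrange k v hv).1
    have hstep := TK_succ data k
    rw [hsnap] at hstep
    have hlen : (TK data (k + 1)).length = data.length := by
      rw [hstep, symInner_len, ihlen]
    refine ⟨hlen, ?_, ?_⟩
    · intro i x hx
      rw [hstep, symInner_mem _ _ _ hsnap_nn] at hx
      rcases hx with h | ⟨hx, -⟩
      · exact ihrange i x h
      · subst hx; constructor <;> [positivity; exact_mod_cast by omega]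
    · intro i x
      rw [hstep, symInner_mem _ _ _ hsnap_nn, ihmem i x, ihlen]
      constructor
      · rintro ((h | ⟨j, hj, hx, hmem⟩) | ⟨hx, v, hv, hvi, hvn⟩)
        · exact Or.inl h
        · exact Or.inr ⟨j, by omega, hx, hmem⟩
        · -- x = k, and some v in the snapshot has v.toNat = i
          have hv0 : (0:Int) ≤ v := (ihrange k v hv).1
          have hvi' : v = (i : Int) := by omega
          subst hvi'
          rcases (ihmem k (i : Int)).mp hv with h | ⟨j, hj, hij, hmem⟩
          · exact Or.inr ⟨k, by omega, hx, h⟩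
          · -- (i : Int) = j, so x = k lies in tmpInit[i]
            have : i = j := by exact_mod_cast hij
            subst this
            exact Or.inl (by rw [hx]; exact hmem)
      · rintro (h | ⟨j, hj, hx, hmem⟩)
        · exact Or.inl (Or.inl h)
        · by_cases hjk : j < k
          · exact Or.inl (Or.inr ⟨j, hjk, hx, hmem⟩)
          · have : j = k := by omega
            subst this
            refine Or.inr ⟨hx, (i : Int), ?_, by omega, ?_⟩
            · exact (ihmem j (i : Int)).mpr (Or.inl hmem)
            · have := (tmp0_range data hpre j (i : Int) hmem).2
              simp only [Int.toNat_natCast]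
              omega

-- mask bits
lemma maskOf_aux (l : List Int) (m : Int) (hm : 0 ≤ m) :
    0 ≤ l.foldl (fun mask v => PySem.Int.bor mask ((1:Int) <<< (v.toNat:Int))) m ∧
    ∀ w, (l.foldl (fun mask v => PySem.Int.bor mask ((1:Int) <<< (v.toNat:Int))) m).toNat.testBit w
        = (m.toNat.testBit w || decide (∃ v ∈ l, v.toNat = w)) := by
  induction l generalizing m with
  | nil => simp [hm]
  | cons v l ih =>
    have hb : PySem.Int.bor m ((1:Int) <<< (v.toNat:Int))
        = ((m.toNat ||| 1 <<< v.toNat : Nat) : Int) := by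
      rw [one_shl_cast, PySem.Int.bor_of_nonneg hm (by positivity), Int.toNat_natCast]
    rw [List.foldl_cons, hb]
    obtain ⟨h1, h2⟩ := ih ((m.toNat ||| 1 <<< v.toNat : Nat) : Int) (by positivity)
    refine ⟨h1, fun w => ?_⟩
    rw [h2 w, Int.toNat_natCast, Nat.testBit_or, testBit_one_shl]
    by_cases hv : v.toNat = w
    · simp [hv]
    · simp [hv]

-- the final build loop of A writes maskOf (tmp2[j]) at every j < k
lemma buildA_spec (tmp2 : List (List Int)) (n k : Nat) (hk : k ≤ n) :
    (AK tmp2 n k).length = n ∧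
    (∀ j < n, (AK tmp2 n k).getD j 0 = if j < k then maskOf (tmp2.getD j []) else 0) := by
  induction k with
  | zero =>
    refine ⟨by simp [AK, PySem.List.pyRange], fun j hj => ?_⟩
    have : (AK tmp2 n 0) = List.replicate n (0:Int) := by simp [AK, PySem.List.pyRange]
    rw [this, List.getD_eq_getElem _ _ (by simpa using hj)]
    simp
  | succ k ih =>
    obtain ⟨ihlen, ihget⟩ := ih (by omega)
    have hstep : AK tmp2 n (k + 1)
        = PySem.List.pySetD (AK tmp2 n k) (k : Int)
            (maskOf (PySem.List.pyGetD tmp2 (k : Int) [])) := by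
      unfold AK
      rw [show ((k + 1 : Nat) : Int) = (k : Int) + 1 by push_cast; ring]
      rw [PySem.List.pyRange_one_succ_right (by positivity)]
      rw [List.foldl_append]
      rfl
    rw [hstep, PySem.List.pySetD_of_nonneg _ _ (by positivity), Int.toNat_natCast,
      PySem.List.pyGetD_of_nonneg _ _ (by positivity), Int.toNat_natCast]
    refine ⟨by rw [List.length_set, ihlen], fun j hj => ?_⟩
    by_cases hjk : j = k
    · subst hjk
      have hk1 : j < (AK tmp2 n j).length := by omega
      rw [List.getD_eq_getElem _ _ (by rw [List.length_set]; exact hk1),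
        List.getElem_set_self (by rw [List.length_set]; exact hk1), if_pos (by omega)]
    · rw [show ((AK tmp2 n k).set k _).getD j 0 = (AK tmp2 n k).getD j 0 by
        simp [List.getD, List.getElem?_set_ne (Ne.symm hjk)]]
      rw [ihget j hj]
      by_cases h : j < k
      · rw [if_pos h, if_pos (by omega : j < k + 1)]
      · rw [if_neg h, if_neg (by omega : ¬ j < k + 1)]

-- A's output, on bits: for j < n, bit w of adj[j] ↔ w < n, w ≠ j and the edge is present
lemma A_bits (data : List (List Int)) (hpre : Pre_load_adjlist data) :
    (load_adjlist data).length = data.length ∧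
    (∀ x ∈ load_adjlist data, 0 ≤ x) ∧
    ∀ j, j < data.length → ∀ w,
      bitOf (load_adjlist data) j w
        = decide (w < data.length ∧ w ≠ j ∧
            ((w : Int) ∈ data.getD j [] ∨ (j : Int) ∈ data.getD w [])) := by
  obtain ⟨blen, bget⟩ := buildA_spec (TK data data.length) data.length data.length le_rfl
  obtain ⟨slen, srange, smem⟩ := symPhase_spec data hpre data.length le_rfl
  rw [load_adjlist_eq]
  have hmask_nn : ∀ l : List Int, 0 ≤ maskOf l := by
    intro l
    exact (maskOf_aux l 0 le_rfl).1
  refine ⟨blen, ?_, ?_⟩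
  · intro x hx
    obtain ⟨j, hj, rfl⟩ := List.mem_iff_getElem.mp hx
    rw [← List.getD_eq_getElem _ 0 hj, bget j (by omega), if_pos (by omega)]
    exact hmask_nn _
  · intro j hj w
    unfold bitOf
    rw [bget j hj, if_pos hj]
    have hm := (maskOf_aux ((TK data data.length).getD j []) 0 le_rfl).2 w
    unfold maskOf
    rw [hm]
    simp only [Int.toNat_zero, Nat.zero_testBit, Bool.false_or]
    apply decide_eq_decide.mpr
    constructor
    · rintro ⟨v, hv, hvw⟩
      obtain ⟨hv0, hvn⟩ := srange j v hv
      have hveq : v = (w : Int) := by omega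
      subst hveq
      have hwn : w < data.length := by omega
      rcases (smem j (w : Int)).mp hv with h | ⟨j', hj', hww, hmem⟩
      · obtain ⟨-, hmem, hne⟩ := (tmp0_mem data j (w : Int)).mp h
        exact ⟨hwn, by exact_mod_cast hne, Or.inl hmem⟩
      · have : w = j' := by exact_mod_cast hww
        subst this
        obtain ⟨-, hmem', hne⟩ := (tmp0_mem data w (j : Int)).mp hmem
        refine ⟨hwn, ?_, Or.inr hmem'⟩
        intro hwj; exact hne (by rw [hwj])
    · rintro ⟨hwn, hwj, h | h⟩
      · refine ⟨(w : Int), ?_, by omega⟩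
        apply (smem j (w : Int)).mpr
        exact Or.inl ((tmp0_mem data j (w : Int)).mpr ⟨hj, h, by exact_mod_cast hwj⟩)
      · refine ⟨(w : Int), ?_, by omega⟩
        apply (smem j (w : Int)).mpr
        refine Or.inr ⟨w, hwn, rfl, ?_⟩
        exact (tmp0_mem data w (j : Int)).mpr ⟨hwn, h, by
          intro hc
          exact hwj (by exact_mod_cast hc.symm)⟩

-- ---- B side ----

lemma rowB_spec (u : Int) (hu : 0 ≤ u) (vs : List Int) (hvs : ∀ v ∈ vs, 0 ≤ v)
    (adj : List Int) (hnn : ∀ x ∈ adj, 0 ≤ x) :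
    let R := vs.foldl
        (fun adj v =>
          if v ≠ u then
            let adj1 := PySem.List.pySetD adj u
              (PySem.Int.bor (PySem.List.pyGetD adj u 0) ((1:Int) <<< (v.toNat:Int)))
            PySem.List.pySetD adj1 v
              (PySem.Int.bor (PySem.List.pyGetD adj1 v 0) ((1:Int) <<< (u.toNat:Int)))
          else adj) adj
    R.length = adj.length ∧ (∀ x ∈ R, 0 ≤ x) ∧
    ∀ j w, bitOf R j w = (bitOf adj j w ||
      decide (∃ v ∈ vs, v ≠ u ∧
        ((j = u.toNat ∧ w = v.toNat ∧ u.toNat < adj.length) ∨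
         (j = v.toNat ∧ w = u.toNat ∧ v.toNat < adj.length)))) := by
  induction vs generalizing adj with
  | nil =>
    refine ⟨rfl, hnn, fun j w => by simp⟩
  | cons v vs ih =>
    have hv : (0:Int) ≤ v := hvs v (by simp)
    by_cases hvu : v = u
    · subst hvu
      rw [List.foldl_cons, if_neg (by simp)]
      obtain ⟨l1, n1, b1⟩ := ih (fun x hx => hvs x (by simp [hx])) adj hnn
      refine ⟨l1, n1, fun j w => ?_⟩
      rw [b1 j w]
      congr 1
      apply decide_eq_decide.mpr
      constructor
      · rintro ⟨x, hx, hxu, hrest⟩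
        exact ⟨x, by simp [hx], hxu, hrest⟩
      · rintro ⟨x, hx, hxu, hrest⟩
        rcases List.mem_cons.mp hx with rfl | hx
        · exact absurd rfl hxu
        · exact ⟨x, hx, hxu, hrest⟩
    · rw [List.foldl_cons]
      dsimp only []
      rw [if_pos hvu]
      rw [PySem.List.pyGetD_of_nonneg adj 0 hu, PySem.List.pySetD_of_nonneg adj _ hu]
      set a1 := adj.set u.toNat
        (PySem.Int.bor (adj.getD u.toNat 0) ((1:Int) <<< (v.toNat : Int))) with hadj1
      rw [PySem.List.pyGetD_of_nonneg a1 0 hv, PySem.List.pySetD_of_nonneg a1 _ hv]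
      set adj2 := a1.set v.toNat
        (PySem.Int.bor (a1.getD v.toNat 0) ((1:Int) <<< (u.toNat : Int))) with hadj2
      have hnn1 : ∀ x ∈ a1, 0 ≤ x := nonneg_upd adj hnn u.toNat v.toNat
      have hnn2 : ∀ x ∈ adj2, 0 ≤ x := nonneg_upd a1 hnn1 v.toNat u.toNat
      have hl1 : a1.length = adj.length := List.length_set ..
      have hl2 : adj2.length = adj.length := by rw [hadj2, List.length_set, hl1]
      obtain ⟨l2, n2, b2⟩ := ih (fun x hx => hvs x (by simp [hx])) adj2 hnn2
      refine ⟨by rw [l2, hl2], n2, fun j w => ?_⟩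
      rw [b2 j w]
      rw [show bitOf adj2 j w = _ from bit_upd a1 hnn1 v.toNat u.toNat j w]
      rw [show bitOf a1 j w = _ from bit_upd adj hnn u.toNat v.toNat j w]
      rw [hl1, hl2]
      cases hb : bitOf adj j w
      · simp only [Bool.false_or]
        rw [← Bool.decide_or, ← Bool.decide_or]
        apply decide_eq_decide.mpr
        constructor
        · rintro ((⟨h1, h2, h3⟩ | ⟨h1, h2, h3⟩) | ⟨x, hx, hxu, hrest⟩)
          · exact ⟨v, by simp, hvu, Or.inl ⟨h1, h2, h3⟩⟩
          · exact ⟨v, by simp, hvu, Or.inr ⟨h1, h2, h3⟩⟩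
          · exact ⟨x, by simp [hx], hxu, hrest⟩
        · rintro ⟨x, hx, hxu, hrest⟩
          rcases List.mem_cons.mp hx with rfl | hx
          · rcases hrest with h | h
            · exact Or.inl (Or.inl h)
            · exact Or.inl (Or.inr h)
          · exact Or.inr ⟨x, hx, hxu, hrest⟩
      · simp


lemma outerB_spec (xs : List (List Int)) (s : Nat) (hxs : ∀ row ∈ xs, ∀ v ∈ row, 0 ≤ v)
    (adj : List Int) (hnn : ∀ x ∈ adj, 0 ≤ x) :
    let R := (PySem.List.enumerate xs (s : Int)).foldl
      (fun adj p =>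
        p.2.foldl
          (fun adj v =>
            if v ≠ p.1 then
              let adj1 := PySem.List.pySetD adj p.1
                (PySem.Int.bor (PySem.List.pyGetD adj p.1 0) ((1:Int) <<< (v.toNat:Int)))
              PySem.List.pySetD adj1 v
                (PySem.Int.bor (PySem.List.pyGetD adj1 v 0) ((1:Int) <<< (p.1.toNat:Int)))
            else adj)
          adj) adj
    R.length = adj.length ∧ (∀ x ∈ R, 0 ≤ x) ∧
    ∀ j w, bitOf R j w = (bitOf adj j w ||
      decide (∃ k < xs.length, ∃ v ∈ xs.getD k [], v ≠ ((s + k : Nat) : Int) ∧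
        ((j = s + k ∧ w = v.toNat ∧ s + k < adj.length) ∨
         (j = v.toNat ∧ w = s + k ∧ v.toNat < adj.length)))) := by
  induction xs generalizing s adj with
  | nil =>
    refine ⟨rfl, hnn, fun j w => by simp [PySem.List.enumerate]⟩
  | cons row xs ih =>
    rw [PySem.List.enumerate_cons, List.foldl_cons]
    dsimp only []
    obtain ⟨l1, n1, b1⟩ := rowB_spec (s : Int) (by positivity) row
      (fun v hv => hxs row (by simp) v hv) adj hnn
    set R1 := row.foldl
        (fun adj v =>
          if v ≠ (s : Int) then
            let adj1 := PySem.List.pySetD adj (s : Int)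
              (PySem.Int.bor (PySem.List.pyGetD adj (s : Int) 0) ((1:Int) <<< (v.toNat : Int)))
            PySem.List.pySetD adj1 v
              (PySem.Int.bor (PySem.List.pyGetD adj1 v 0) ((1:Int) <<< ((s : Int).toNat : Int)))
          else adj) adj with hR1
    have hcast : ((s : Int) + 1) = ((s + 1 : Nat) : Int) := by push_cast; ring
    rw [hcast]
    obtain ⟨l2, n2, b2⟩ := ih (s + 1) (fun r hr v hv => hxs r (by simp [hr]) v hv) R1 n1
    refine ⟨by rw [l2, l1], n2, fun j w => ?_⟩
    rw [b2 j w, b1 j w, l1, Bool.or_assoc]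
    congr 1
    rw [← Bool.decide_or]
    apply decide_eq_decide.mpr
    simp only [Int.toNat_natCast]
    constructor
    · rintro (⟨v, hv, hvne, hcase⟩ | ⟨k, hk, v, hv, hvne, hcase⟩)
      · refine ⟨0, by simp, v, by simpa using hv, by simpa using hvne, ?_⟩
        simpa using hcase
      · refine ⟨k + 1, by simp; omega, v, by simpa using hv, ?_, ?_⟩
        · intro hc; apply hvne; rw [hc]; congr 1; omega
        · rcases hcase with ⟨h1, h2, h3⟩ | ⟨h1, h2, h3⟩
          · exact Or.inl ⟨by omega, h2, by omega⟩
          · exact Or.inr ⟨h1, by omega, h3⟩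
    · rintro ⟨k, hk, v, hv, hvne, hcase⟩
      cases k with
      | zero =>
        refine Or.inl ⟨v, by simpa using hv, by simpa using hvne, ?_⟩
        simpa using hcase
      | succ k =>
        refine Or.inr ⟨k, by simpa using hk, v, by simpa using hv, ?_, ?_⟩
        · intro hc; apply hvne; rw [hc]; congr 1; omega
        · rcases hcase with ⟨h1, h2, h3⟩ | ⟨h1, h2, h3⟩
          · exact Or.inl ⟨by omega, h2, by omega⟩
          · exact Or.inr ⟨h1, by omega, h3⟩

lemma B_bits (data : List (List Int)) (hpre : Pre_load_adjlist data) :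
    (load_adjlist_alt data).length = data.length ∧
    (∀ x ∈ load_adjlist_alt data, 0 ≤ x) ∧
    ∀ j, j < data.length → ∀ w,
      bitOf (load_adjlist_alt data) j w
        = decide (w < data.length ∧ w ≠ j ∧
            ((w : Int) ∈ data.getD j [] ∨ (j : Int) ∈ data.getD w [])) := by
  have hpre' : ∀ r ∈ data, ∀ v ∈ r, 0 ≤ v := fun r hr v hv => (hpre r hr v hv).1
  have hinit_nn : ∀ x ∈ List.replicate data.length (0:Int), 0 ≤ x := by
    intro x hx
    rw [List.eq_of_mem_replicate hx]
  obtain ⟨l, n2, b⟩ := outerB_spec data 0 hpre' (List.replicate data.length (0:Int)) hinit_nn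
  have halt : load_adjlist_alt data = (PySem.List.enumerate data ((0:Nat) : Int)).foldl
      (fun adj p =>
        p.2.foldl
          (fun adj v =>
            if v ≠ p.1 then
              let adj1 := PySem.List.pySetD adj p.1
                (PySem.Int.bor (PySem.List.pyGetD adj p.1 0) ((1:Int) <<< (v.toNat:Int)))
              PySem.List.pySetD adj1 v
                (PySem.Int.bor (PySem.List.pyGetD adj1 v 0) ((1:Int) <<< (p.1.toNat:Int)))
            else adj)
          adj) (List.replicate data.length (0:Int)) := rfl
  rw [halt]
  have hinit_bit : ∀ j w, bitOf (List.replicate data.length (0:Int)) j w = false := by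
    intro j w
    unfold bitOf
    rcases lt_or_ge j data.length with h | h
    · rw [List.getD_eq_getElem _ _ (by simpa using h), List.getElem_replicate]
      simp
    · rw [List.getD_eq_default _ _ (by simpa using h)]
      simp
  refine ⟨by rw [l]; simp, n2, fun j hj w => ?_⟩
  rw [b j w, hinit_bit j w, Bool.false_or]
  apply decide_eq_decide.mpr
  simp only [Nat.zero_add, List.length_replicate]
  constructor
  · rintro ⟨k, hk, v, hv, hvne, hcase⟩
    have hrow : data.getD k [] ∈ data := by
      rw [List.getD_eq_getElem _ _ hk]; exact List.getElem_mem _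
    obtain ⟨hv0, hvn⟩ := hpre _ hrow v hv
    rcases hcase with ⟨hjk, hwv, -⟩ | ⟨hjv, hwk, -⟩
    · subst hjk
      refine ⟨by omega, by omega, Or.inl ?_⟩
      rw [show ((w:Nat):Int) = v by omega]
      exact hv
    · subst hwk
      refine ⟨hk, by omega, Or.inr ?_⟩
      rw [show ((j:Nat):Int) = v by omega]
      exact hv
  · rintro ⟨hwn, hwj, h | h⟩
    · have hjn : j < data.length := hj
      refine ⟨j, hjn, (w : Int), h, by omega, Or.inl ⟨rfl, by omega, by omega⟩⟩
    · refine ⟨w, hwn, (j : Int), h, by omega, Or.inr ⟨by omega, rfl, by omega⟩⟩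

-- ===== VERDICT (by name: the statement is the Claim_ definition above) =====
theorem load_adjlist_spec : Claim_equal_load_adjlist := by
  intro data _ hpre
  unfold Spec_load_adjlist
  obtain ⟨hlA, hnnA, hbA⟩ := A_bits data hpre
  obtain ⟨hlB, hnnB, hbB⟩ := B_bits data hpre
  apply List.ext_getElem (by omega)
  intro j hj hj'
  have hj0 : j < data.length := by omega
  have gA : (load_adjlist data).getD j 0 = (load_adjlist data)[j] := List.getD_eq_getElem _ _ hj
  have gB : (load_adjlist_alt data).getD j 0 = (load_adjlist_alt data)[j] := List.getD_eq_getElem _ _ hj'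
  have nA : 0 ≤ (load_adjlist data)[j] := hnnA _ (List.getElem_mem _)
  have nB : 0 ≤ (load_adjlist_alt data)[j] := hnnB _ (List.getElem_mem _)
  have : (load_adjlist data)[j].toNat = (load_adjlist_alt data)[j].toNat := by
    apply Nat.eq_of_testBit_eq
    intro w
    have h1 := hbA j hj0 w
    have h2 := hbB j hj0 w
    unfold bitOf at h1 h2
    rw [gA] at h1; rw [gB] at h2
    rw [h1, h2]
  omega
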